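-- pv_equiv track=rewrite | github.com/Frod90/coding-test-python | programmers/P77886.py | solution
-- ===== SOURCE A (Python) =====
-- def solution(s):
--     answer = []
--     for num in s:
--         st = []
--         count = 0
--
--         for ch in num:
--             st.append(ch)
--             if len(st) >= 3 and st[-1] == '0' and st[-2] == '1' and st[-3] == '1':
--                 for _ in range(3):
--                     st.pop()
--                 count += 1
--
--         tmp = ''.join(st)
--         index = tmp.rfind('0')
--         if index == -1:
--             answer.append("110" * count + tmp)
--         else:
--             answer.append(tmp[:index + 1] + "110" * count + tmp[index + 1:])
--
--     return answer
-- ===== SOURCE B (Python) =====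
-- def _reduce(num):
--     # repeatedly delete the leftmost '110'; confluent since '110' never overlaps itself
--     count = 0
--     i = num.find('110')
--     while i != -1:
--         num = num[:i] + num[i + 3:]
--         count += 1
--         i = num.find('110')
--     return num, count
--
--
-- def _splice(num, count):
--     i = num.rfind('0')
--     if i == -1:
--         return '110' * count + num
--     return num[:i + 1] + '110' * count + num[i + 1:]
--
--
-- def solution(s):
--     return [_splice(*_reduce(num)) for num in s]
-- ===== Notes on version B (the rewrite author's own statement) =====
-- stated objective: simpler
-- what changed: Replaces the explicit character stack (push each char, pop three on a '110' suffix) by repeated removal of the leftmost '110' occurrence via find + slicing, which is equivalent because '110' has no self-overlap so removal is confluent; the count/splice tail is kept.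
import Mathlib
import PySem

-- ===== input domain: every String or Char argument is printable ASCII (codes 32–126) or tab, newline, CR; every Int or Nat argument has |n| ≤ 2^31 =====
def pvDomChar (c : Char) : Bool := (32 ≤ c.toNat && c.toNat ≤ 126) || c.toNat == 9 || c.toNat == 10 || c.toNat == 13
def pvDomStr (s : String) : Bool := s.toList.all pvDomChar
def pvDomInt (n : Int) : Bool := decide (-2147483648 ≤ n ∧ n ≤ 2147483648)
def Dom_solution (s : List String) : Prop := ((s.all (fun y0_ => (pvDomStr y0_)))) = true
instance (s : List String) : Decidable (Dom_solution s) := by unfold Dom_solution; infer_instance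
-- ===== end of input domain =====

-- B replaces A's explicit character stack by repeated removal of the leftmost '110'
-- occurrence (find + slicing); the count/splice tail is shared. Equivalence is exact.

-- ===== PORT A =====
-- shared tail of both Pythons: index = tmp.rfind('0'); splice '110'*count after it
def splice110 (tmp : List Char) (count : Nat) : List Char :=
  let index := PySem.Chars.rfind tmp ['0']
  if index = -1 then
    PySem.List.pyRepeat ['1','1','0'] (count : Int) ++ tmp
  else
    PySem.List.slice tmp none (some (index + 1)) ++ PySem.List.pyRepeat ['1','1','0'] (count : Int)
      ++ PySem.List.slice tmp (some (index + 1)) none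

-- the inner 'for ch in num' body: push ch, pop three if the stack now ends '1','1','0'
def solStep (p : List Char × Nat) (ch : Char) : List Char × Nat :=
  let st := p.1 ++ [ch]
  if 3 ≤ st.length ∧ PySem.List.pyGet? st (-1) = some '0' ∧
      PySem.List.pyGet? st (-2) = some '1' ∧ PySem.List.pyGet? st (-3) = some '1' then
    (st.dropLast.dropLast.dropLast, p.2 + 1)
  else
    (st, p.2)

def solution (s : List String) : List String :=
  s.foldl (fun answer num =>
    let r := num.toList.foldl solStep ([], 0)
    answer ++ [String.ofList (splice110 r.1 r.2)]) []

-- ===== PORT B =====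
-- while i != -1: num = num[:i] + num[i+3:]; count += 1  (i = num.find('110'))
def reduceB (num : List Char) (count : Nat) : List Char × Nat :=
  let i := PySem.Chars.find num ['1','1','0']
  if h : i = -1 then (num, count)
  else
    reduceB (PySem.List.slice num none (some i) ++ PySem.List.slice num (some (i + 3)) none)
      (count + 1)
termination_by num.length
decreasing_by
  have h0 : (0:Int) ≤ PySem.Chars.find num ['1','1','0'] := by
    have := PySem.Chars.neg_one_le_find num ['1','1','0']
    omega
  have hsp := (PySem.Chars.find_spec (s := num) (sub := ['1','1','0']) h0).1
  have hlen : (PySem.Chars.find num ['1','1','0']).toNat + 3 ≤ num.length := by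
    have := hsp.length_le
    simp at this
    omega
  simp [PySem.List.slice_to _ h0, PySem.List.slice_from _ (by omega : (0:Int) ≤ PySem.Chars.find num ['1','1','0'] + 3)]
  omega

def solution_alt (s : List String) : List String :=
  s.map (fun num =>
    let r := reduceB num.toList 0
    String.ofList (splice110 r.1 r.2))

-- ===== PRECONDITION & SPEC =====
def Spec_solution (s : List String) (out : List String) : Prop := out = solution_alt s
instance (s : List String) (out : List String) : Decidable (Spec_solution s out) := by unfold Spec_solution; infer_instance

-- ===== CLAIM (what is proved, stated in full; the proofs are below) =====
def Claim_equal_solution : Prop := ∀ (s : List String), Dom_solution s → Spec_solution s (solution s)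

-- ===== LEMMAS AND PROOFS =====

-- stack push never pops unless the new suffix is '1','1','0'
theorem solStep_cond (st : List Char) (c : Nat) (ch : Char)
    (h : ¬ ∃ u, st ++ [ch] = u ++ ['1','1','0']) :
    solStep (st, c) ch = (st ++ [ch], c) := by
  unfold solStep
  rw [if_neg]
  rintro ⟨h3, g1, g2, g3⟩
  apply h
  set l := st ++ [ch] with hl
  clear_value l
  have hn : 3 ≤ l.length := h3
  simp only [PySem.List.pyGet?, PySem.List.pyIdx?] at g1 g2 g3
  rw [if_neg (by norm_num), if_pos (by omega)] at g1 g2 g3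
  simp only [Option.bind_some] at g1 g2 g3
  norm_num at g1 g2 g3
  refine ⟨l.take (l.length - 3), ?_⟩
  conv_lhs => rw [← List.take_append_drop (l.length - 3) l]
  congr 1
  apply List.ext_getElem?
  intro i
  rw [List.getElem?_drop]
  match i with
  | 0 => rw [(by omega : l.length - 3 + 0 = l.length - 3)]; simpa using g3
  | 1 => rw [(by omega : l.length - 3 + 1 = l.length - 2)]; simpa using g2
  | 2 => rw [(by omega : l.length - 3 + 2 = l.length - 1)]; simpa using g1
  | (i+3) => rw [List.getElem?_eq_none (by omega), List.getElem?_eq_none (by simp)]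

theorem solStep_pop (u : List Char) (c : Nat) :
    solStep (u ++ ['1','1'], c) '0' = (u, c + 1) := by
  simp [solStep, PySem.List.pyGet?, PySem.List.pyIdx?]

theorem solStep_shift (st : List Char) (c : Nat) (ch : Char) :
    solStep (st, c) ch = ((solStep (st, 0) ch).1, (solStep (st, 0) ch).2 + c) := by
  unfold solStep
  dsimp only
  split_ifs <;> simp [Nat.add_comm]

-- no occurrence of '110' anywhere in st ++ l: the fold just appends
theorem noOcc_fold (l st : List Char) (c : Nat)
    (h : ¬ ['1','1','0'] <:+: st ++ l) :
    l.foldl solStep (st, c) = (st ++ l, c) := by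
  induction l generalizing st with
  | nil => simp
  | cons ch t ih =>
    have hstep : solStep (st, c) ch = (st ++ [ch], c) := by
      apply solStep_cond
      rintro ⟨u, hu⟩
      exact h ⟨u, t, by rw [show st ++ ch :: t = (st ++ [ch]) ++ t by simp, hu]⟩
    rw [List.foldl_cons, hstep, ih]
    · simp
    · intro hinf
      exact h (by simpa using hinf)

-- the count accumulator only shifts the second component
theorem fold_count_shift (l : List Char) (st : List Char) (c : Nat) :
    l.foldl solStep (st, c) = ((l.foldl solStep (st, 0)).1, (l.foldl solStep (st, 0)).2 + c) := by
  induction l generalizing st c with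
  | nil => simp
  | cons ch t ih =>
    rw [List.foldl_cons, List.foldl_cons, solStep_shift st c ch]
    rw [ih (solStep (st, 0) ch).1 ((solStep (st, 0) ch).2 + c)]
    conv_rhs => rw [show solStep (st, 0) ch = ((solStep (st, 0) ch).1, (solStep (st, 0) ch).2) from rfl,
      ih (solStep (st, 0) ch).1 (solStep (st, 0) ch).2]
    simp [Nat.add_assoc]

-- main per-string equivalence
theorem reduceB_aux : ∀ (n : Nat) (l : List Char), l.length ≤ n → ∀ (c : Nat),
    reduceB l c = ((l.foldl solStep ([], 0)).1, (l.foldl solStep ([], 0)).2 + c) := by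
  intro n
  induction n with
  | zero =>
    intro l hl c
    have : l = [] := List.eq_nil_of_length_eq_zero (by omega)
    subst this
    have hfind : PySem.Chars.find ([] : List Char) ['1','1','0'] = -1 := by decide
    rw [reduceB]
    simp [hfind]
  | succ n ih =>
    intro l hl c
    by_cases h : PySem.Chars.find l ['1','1','0'] = -1
    · rw [reduceB]
      simp only [h, dite_true]
      have hno : ¬ ['1','1','0'] <:+: l := (PySem.Chars.find_eq_neg_one_iff _ _).1 h
      have hf := noOcc_fold l [] 0 (by simpa using hno)
      simp [hf]
    · have h0 : (0:Int) ≤ PySem.Chars.find l ['1','1','0'] := by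
        have := PySem.Chars.neg_one_le_find l ['1','1','0']
        omega
      obtain ⟨hpre, hmin⟩ := PySem.Chars.find_spec (s := l) (sub := ['1','1','0']) h0
      set i := PySem.Chars.find l ['1','1','0'] with hi
      set k := i.toNat with hk
      set u := l.take k with hu
      set v := l.drop (k + 3) with hv
      have hk3 : k + 3 ≤ l.length := by
        have := hpre.length_le
        simp at this
        omega
      have hulen : u.length = k := by simp [hu]; omega
      -- the decomposition l = u ++ '110' ++ v
      obtain ⟨w, hw⟩ := hpre
      have hw2 : w = v := by
        have := congrArg (List.drop 3) hw
        simpa [hv, List.drop_drop, Nat.add_comm] using this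
      subst hw2
      have hdecomp : l = u ++ ['1','1','0'] ++ v := by
        conv_lhs => rw [← List.take_append_drop k l, ← hw]
        simp [hu]
      have hdecomp2 : l = (u ++ ['1','1']) ++ '0' :: v := by
        rw [hdecomp]; simp
      -- no occurrence strictly before position k
      have hno_u : ¬ ['1','1','0'] <:+: u := by
        rintro ⟨a, b, hab⟩
        have hlen : a.length + 3 + b.length = u.length := by
          have := congrArg List.length hab
          simp at this
          omega
        have hd : l.drop a.length = ['1','1','0'] ++ (b ++ ['1','1','0'] ++ v) := by
          conv_lhs => rw [hdecomp, ← hab]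
          rw [show (a ++ ['1','1','0'] ++ b) ++ ['1','1','0'] ++ v
              = a ++ (['1','1','0'] ++ (b ++ ['1','1','0'] ++ v)) by simp]
          exact List.drop_left
        exact absurd (show ['1','1','0'] <+: l.drop a.length by
          rw [hd]; exact List.prefix_append _ _) (hmin a.length (by omega))
      have hno_u11 : ¬ ['1','1','0'] <:+: u ++ ['1','1'] := by
        rintro ⟨a, b, hab⟩
        have hlen : a.length + 3 + b.length = u.length + 2 := by
          have := congrArg List.length hab
          simp at this
          omega
        have hd : l.drop a.length = ['1','1','0'] ++ (b ++ '0' :: v) := by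
          conv_lhs => rw [hdecomp2, ← hab]
          rw [show (a ++ ['1','1','0'] ++ b) ++ '0' :: v
              = a ++ (['1','1','0'] ++ (b ++ '0' :: v)) by simp]
          exact List.drop_left
        exact absurd (show ['1','1','0'] <+: l.drop a.length by
          rw [hd]; exact List.prefix_append _ _) (hmin a.length (by omega))
      -- the stack fold on l : prefix appends, then one pop, then continues from (u, 1)
      have hfold : l.foldl solStep ([], 0)
          = ((v.foldl solStep (u, 0)).1, (v.foldl solStep (u, 0)).2 + 1) := by
        conv_lhs => rw [hdecomp2]
        rw [List.foldl_append, noOcc_fold (u ++ ['1','1']) [] 0 (by simpa using hno_u11)]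
        rw [List.foldl_cons]
        rw [show ([] : List Char) ++ (u ++ ['1','1']) = u ++ ['1','1'] by simp]
        rw [solStep_pop, fold_count_shift]
      -- the stack fold on u ++ v agrees with continuing from (u, 0)
      have hfold2 : (u ++ v).foldl solStep ([], 0) = v.foldl solStep (u, 0) := by
        rw [List.foldl_append, noOcc_fold u [] 0 (by simpa using hno_u)]
        simp
      -- one step of reduceB
      rw [reduceB]
      simp only [← hi, h, dite_false]
      rw [PySem.List.slice_to _ h0, PySem.List.slice_from _ (by omega : (0:Int) ≤ i + 3)]
      rw [show (i + 3).toNat = k + 3 by omega]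
      rw [ih (u ++ v) (by simp [hulen, hv]; omega) (c + 1), hfold2, hfold]
      simp [Nat.add_assoc, Nat.add_comm]

theorem reduceB_eq_fold (l : List Char) (c : Nat) :
    reduceB l c = ((l.foldl solStep ([], 0)).1, (l.foldl solStep ([], 0)).2 + c) :=
  reduceB_aux l.length l le_rfl c

-- ===== VERDICT (by name: the statement is the Claim_ definition above) =====
theorem solution_spec : Claim_equal_solution := by
  intro s _
  unfold Spec_solution solution solution_alt
  rw [PySem.List.foldl_append_singleton_eq_map]
  simp only [List.nil_append]
  apply List.map_congr_left
  intro num _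
  have h := reduceB_eq_fold num.toList 0
  simp only [h, Nat.add_zero]
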